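-- pv_equiv track=rewrite | github.com/GoldFlakes611/simple-MLP-for-polar-bear-dice-game | game.py | polar_bear
-- ===== SOURCE A (Python) =====
-- def polar_bear(d1,d2,d3,d4,d5):
--
--     new_list = [d1,d2,d3,d4,d5]
--
--
--     for i,var in enumerate(new_list):
--         new_list[i] = int(var)
--
--     dic_pb = {1:0,2:0,3:2,4:0,5:4,6:0}
--     dic_fish={1:6,2:5,3:0,4:3,5:0,6:1}
--
--
--     for i in range(len(new_list)):
--         new_list[i] = dic_pb[new_list[i]]
--
--     num_pb = sum(new_list)
--
--     new_list = [d1,d2,d3,d4,d5]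
--     for i,var in enumerate(new_list):
--         new_list[i] = int(var)
--
--
--     for i in range(len(new_list)):
--         new_list[i] = dic_fish[new_list[i]]
--
--     num_fish = sum(new_list)
--     new_list = [d1,d2,d3,d4,d5]
--
--     for i,var in enumerate(new_list):
--         new_list[i] = int(var)
--
--     for i, var in enumerate(new_list):
--         if var == 3 or var == 5:
--             new_list[i] = 14
--         else:
--             new_list[i] = 0
--     num_plankton = sum(new_list)
--     new_list = [num_pb,num_fish,num_plankton]
--     return num_pb, num_fish, num_plankton
-- ===== SOURCE B (Python) =====
-- def polar_bear(d1, d2, d3, d4, d5):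
--     # Histogram approach: count how many dice show each face once, then walk the
--     # distinct faces, adding weight * multiplicity for each of the three scores.
--     dic_pb = {1: 0, 2: 0, 3: 2, 4: 0, 5: 4, 6: 0}
--     dic_fish = {1: 6, 2: 5, 3: 0, 4: 3, 5: 0, 6: 1}
--     counts = {}
--     for d in (d1, d2, d3, d4, d5):
--         d = int(d)
--         counts[d] = counts.get(d, 0) + 1
--     num_pb = num_fish = num_plankton = 0
--     for face, n in counts.items():
--         num_pb += dic_pb[face] * n
--         num_fish += dic_fish[face] * n
--         if face == 3 or face == 5:
--             num_plankton += 14 * n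
--     return num_pb, num_fish, num_plankton
-- ===== Notes on version B (the rewrite author's own statement) =====
-- stated objective: alternative
-- what changed: Replaces A's three rebuild-list-then-map-then-sum passes over the dice with a face histogram built in one pass, then a single walk over the distinct faces adding weight-times-multiplicity to the three totals.
import Mathlib
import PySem

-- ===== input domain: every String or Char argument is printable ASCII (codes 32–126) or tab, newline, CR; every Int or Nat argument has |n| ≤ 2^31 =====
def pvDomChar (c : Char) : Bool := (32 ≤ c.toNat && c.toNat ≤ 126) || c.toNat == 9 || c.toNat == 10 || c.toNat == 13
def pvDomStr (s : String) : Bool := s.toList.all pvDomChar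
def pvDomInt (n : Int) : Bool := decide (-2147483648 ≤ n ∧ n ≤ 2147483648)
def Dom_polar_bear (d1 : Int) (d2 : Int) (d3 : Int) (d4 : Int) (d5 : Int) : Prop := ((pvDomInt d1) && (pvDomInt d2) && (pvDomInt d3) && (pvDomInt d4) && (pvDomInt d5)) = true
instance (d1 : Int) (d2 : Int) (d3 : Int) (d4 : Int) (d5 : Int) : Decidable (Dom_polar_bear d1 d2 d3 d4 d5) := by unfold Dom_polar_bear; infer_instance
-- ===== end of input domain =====

-- B builds a face histogram in one pass and walks the distinct faces adding weight × multiplicity,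
-- instead of A's three rebuild-list/map/sum passes.

-- ===== PORT A =====
-- A's dict literals (int(var) on an Int argument is the identity and is dropped)
def dicPbA : PySem.Dict Int Int := PySem.Dict.ofList [(1,0),(2,0),(3,2),(4,0),(5,4),(6,0)]
def dicFishA : PySem.Dict Int Int := PySem.Dict.ofList [(1,6),(2,5),(3,0),(4,3),(5,0),(6,1)]

-- dict lookups use getD _ 0; Python raises KeyError on a die outside 1..6 — exactly the inputs Pre_ excludes
def polar_bear (d1 : Int) (d2 : Int) (d3 : Int) (d4 : Int) (d5 : Int) : Int × Int × Int :=
  let l1 := ([d1,d2,d3,d4,d5].map (fun x => dicPbA.getD x 0))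
  let num_pb := l1.foldl (· + ·) 0
  let l2 := ([d1,d2,d3,d4,d5].map (fun x => dicFishA.getD x 0))
  let num_fish := l2.foldl (· + ·) 0
  let l3 := ([d1,d2,d3,d4,d5].map (fun v => if v = 3 ∨ v = 5 then (14 : Int) else 0))
  let num_plankton := l3.foldl (· + ·) 0
  (num_pb, num_fish, num_plankton)

-- ===== PORT B =====
def dicPbB : PySem.Dict Int Int := PySem.Dict.ofList [(1,0),(2,0),(3,2),(4,0),(5,4),(6,0)]
def dicFishB : PySem.Dict Int Int := PySem.Dict.ofList [(1,6),(2,5),(3,0),(4,3),(5,0),(6,1)]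

-- counts[d] = counts.get(d, 0) + 1 over the five dice, then one walk over counts.items();
-- dic_pb[face]/dic_fish[face] use getD _ 0 (Python raises KeyError outside 1..6 — excluded by Pre_)
def polar_bear_alt (d1 : Int) (d2 : Int) (d3 : Int) (d4 : Int) (d5 : Int) : Int × Int × Int :=
  let counts := [d1,d2,d3,d4,d5].foldl
    (fun (c : PySem.Dict Int Int) d => c.insert d (c.getD d 0 + 1)) PySem.Dict.empty
  counts.items.foldl
    (fun (acc : Int × Int × Int) p =>
      (acc.1 + dicPbB.getD p.1 0 * p.2,
       acc.2.1 + dicFishB.getD p.1 0 * p.2,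
       acc.2.2 + (if p.1 = 3 ∨ p.1 = 5 then 14 * p.2 else 0)))
    (0, 0, 0)

-- ===== PRECONDITION & SPEC =====
-- Pre_ excludes exactly the inputs where Python A raises KeyError: a die outside 1..6
def Pre_polar_bear (d1 : Int) (d2 : Int) (d3 : Int) (d4 : Int) (d5 : Int) : Prop :=
  (1 ≤ d1 ∧ d1 ≤ 6) ∧ (1 ≤ d2 ∧ d2 ≤ 6) ∧ (1 ≤ d3 ∧ d3 ≤ 6) ∧ (1 ≤ d4 ∧ d4 ≤ 6) ∧ (1 ≤ d5 ∧ d5 ≤ 6)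
instance (d1 : Int) (d2 : Int) (d3 : Int) (d4 : Int) (d5 : Int) : Decidable (Pre_polar_bear d1 d2 d3 d4 d5) := by unfold Pre_polar_bear; infer_instance

def pvWitness_polar_bear : Int × Int × Int × Int × Int := (1, 3, 5, 5, 6)

def Spec_polar_bear (d1 : Int) (d2 : Int) (d3 : Int) (d4 : Int) (d5 : Int) (out : Int × Int × Int) : Prop := out = polar_bear_alt d1 d2 d3 d4 d5
instance (d1 : Int) (d2 : Int) (d3 : Int) (d4 : Int) (d5 : Int) (out : Int × Int × Int) : Decidable (Spec_polar_bear d1 d2 d3 d4 d5 out) := by unfold Spec_polar_bear; infer_instance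

-- ===== CLAIM (what is proved, stated in full; the proofs are below) =====
def Claim_equal_polar_bear : Prop := ∀ (d1 : Int) (d2 : Int) (d3 : Int) (d4 : Int) (d5 : Int), Dom_polar_bear d1 d2 d3 d4 d5 → Pre_polar_bear d1 d2 d3 d4 d5 → Spec_polar_bear d1 d2 d3 d4 d5 (polar_bear d1 d2 d3 d4 d5)

-- ===== LEMMAS AND PROOFS =====

-- a triple-accumulator fold over pairs splits into three mapped sums
theorem foldl_triple (l : List (Int × Int)) (f g h : Int × Int → Int) (a b c : Int) :
    l.foldl (fun (acc : Int × Int × Int) p => (acc.1 + f p, acc.2.1 + g p, acc.2.2 + h p)) (a, b, c)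
      = (a + (l.map f).sum, b + (l.map g).sum, c + (l.map h).sum) := by
  induction l generalizing a b c with
  | nil => simp
  | cons p t ih => simp [List.foldl_cons, ih]; refine ⟨by ring, by ring, by ring⟩

-- indicator sum over a nodup key list containing x picks out w x
theorem sum_indicator_not_mem (w : Int → Int) (ks : List Int) (x : Int) (hx : x ∉ ks) :
    (ks.map (fun k => if x = k then w k else (0:Int))).sum = 0 := by
  induction ks with
  | nil => simp
  | cons a t ih =>
    simp only [List.mem_cons, not_or] at hx
    simp [ih hx.2, hx.1]

theorem sum_indicator (w : Int → Int) (ks : List Int) (x : Int)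
    (hnd : ks.Nodup) (hx : x ∈ ks) :
    (ks.map (fun k => if x = k then w k else (0:Int))).sum = w x := by
  induction ks with
  | nil => simp at hx
  | cons a t ih =>
    rcases List.mem_cons.mp hx with h | h
    · subst h
      simp [sum_indicator_not_mem w t x (List.nodup_cons.mp hnd).1]
    · have hne : x ≠ a := fun e => (List.nodup_cons.mp hnd).1 (e ▸ h)
      simp [hne, ih (List.nodup_cons.mp hnd).2 h]

-- the group-by identity: summing weight × multiplicity over the distinct keys equals summing weights over the list
theorem sum_over_keys (w : Int → Int) (ks xs : List Int)
    (hnd : ks.Nodup) (hsub : ∀ x ∈ xs, x ∈ ks) :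
    (ks.map (fun k => w k * (xs.count k : Int))).sum = (xs.map w).sum := by
  induction xs with
  | nil => simp
  | cons x t ih =>
    have hx : x ∈ ks := hsub x (List.mem_cons_self ..)
    have hsub' : ∀ y ∈ t, y ∈ ks := fun y hy => hsub y (List.mem_cons_of_mem _ hy)
    have expand : ∀ k : Int, w k * (((x :: t).count k : Nat) : Int)
        = w k * (t.count k : Int) + (if x = k then w k else 0) := by
      intro k
      rw [List.count_cons]
      push_cast
      by_cases h : x = k
      · subst h; simp; ring
      · simp [h]
    calc (ks.map (fun k => w k * ((x :: t).count k : Int))).sum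
        = (ks.map (fun k => w k * (t.count k : Int) + (if x = k then w k else 0))).sum := by
          simp only [expand]
      _ = (ks.map (fun k => w k * (t.count k : Int))).sum
            + (ks.map (fun k => if x = k then w k else (0:Int))).sum := by
          rw [← List.sum_map_add]
      _ = (t.map w).sum + w x := by rw [ih hsub', sum_indicator w ks x hnd hx]
      _ = ((x :: t).map w).sum := by simp [List.map_cons]; ring


-- A's per-key weights agree with B's dict lookups / plankton branch
theorem plank_weight (k n : Int) :
    (if k = 3 ∨ k = 5 then 14 * n else 0) = (if k = 3 ∨ k = 5 then (14:Int) else 0) * n := by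
  split_ifs <;> ring

-- ===== VERDICT (by name: the statement is the Claim_ definition above) =====
theorem polar_bear_spec : Claim_equal_polar_bear := by
  intro d1 d2 d3 d4 d5 _ hpre
  unfold Spec_polar_bear
  show polar_bear d1 d2 d3 d4 d5 = _
  rw [polar_bear_alt]
  rw [PySem.Dict.foldl_insert_getD_add_one_eq_counter, PySem.Dict.items_counter]
  simp only [plank_weight]
  rw [foldl_triple]
  simp only [List.map_map, Function.comp_def]
  have hnd : (PySem.Set.ofList [d1,d2,d3,d4,d5]).Nodup := PySem.Set.nodup_ofList _
  have hsub : ∀ x ∈ [d1,d2,d3,d4,d5], x ∈ PySem.Set.ofList [d1,d2,d3,d4,d5] := by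
    intro x hx; exact (PySem.Set.mem_ofList ..).mpr hx
  rw [sum_over_keys (fun k => dicPbB.getD k 0) _ _ hnd hsub,
      sum_over_keys (fun k => dicFishB.getD k 0) _ _ hnd hsub,
      sum_over_keys (fun k => if k = 3 ∨ k = 5 then (14:Int) else 0) _ _ hnd hsub]
  unfold polar_bear
  simp only [List.map, List.foldl, List.sum_cons, List.sum_nil, zero_add, Prod.mk.injEq]
  refine ⟨?_, ?_, ?_⟩
  · rw [show dicPbB = dicPbA from rfl]; ring
  · rw [show dicFishB = dicFishA from rfl]; ring
  · ring
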